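-- pv_equiv track=rewrite | github.com/smadhu247/CS-115 | hw9.py | how_pop_is_most_pop_artist
-- ===== SOURCE A (Python) =====
-- def how_pop_is_most_pop_artist(user_map):
--     '''Takes in a user_map. Prints out how popular (a number) the most popular
--     artist(s) is(are) based on how many users like a given artist.'''
--     maxScore = 0
--     bestArtist = {}
--     for username, artistList in (user_map.items()):
--         for values in artistList:
--             if values in bestArtist and username[-1] != "$":
--                 bestArtist[values] += 1
--             elif values not in bestArtist and username[-1] != "$":
--                 bestArtist[values] = 1
--     for values in bestArtist.values():
--          if values > maxScore:
--             maxScore = values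
--     return maxScore
-- ===== SOURCE B (Python) =====
-- def how_pop_is_most_pop_artist(user_map):
--     flat = sorted(a for u, arts in user_map.items() for a in arts if u[-1] != "$")
--     best = 0
--     run = 0
--     prev = None
--     for a in flat:
--         run = run + 1 if a == prev else 1
--         prev = a
--         if run > best:
--             best = run
--     return best
-- ===== Notes on version B (the rewrite author's own statement) =====
-- stated objective: alternative
-- what changed: A builds a dict of per-artist counts incrementally and then scans its values for the maximum; B flattens the user map into one list of liked artists (same per-entry guard), sorts it, and takes the maximum run length of equal adjacent names in a single scan.
import Mathlib
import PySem

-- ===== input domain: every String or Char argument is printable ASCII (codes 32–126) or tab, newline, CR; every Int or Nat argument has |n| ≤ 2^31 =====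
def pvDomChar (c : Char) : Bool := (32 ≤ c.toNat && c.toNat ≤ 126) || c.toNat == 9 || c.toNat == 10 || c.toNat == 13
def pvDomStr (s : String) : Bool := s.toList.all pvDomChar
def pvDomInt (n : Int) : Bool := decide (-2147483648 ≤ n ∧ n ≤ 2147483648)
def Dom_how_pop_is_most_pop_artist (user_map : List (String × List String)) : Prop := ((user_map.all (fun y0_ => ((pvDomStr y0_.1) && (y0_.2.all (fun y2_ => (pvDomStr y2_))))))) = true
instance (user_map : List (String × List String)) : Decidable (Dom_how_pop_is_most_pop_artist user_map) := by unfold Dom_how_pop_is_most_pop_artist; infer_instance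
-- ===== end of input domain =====

-- B replaces A's incremental dict-of-counts by flatten + sort + a single max-run scan; alternative decomposition, not claimed faster.

-- shared guard: Python's  username[-1] != "$"  (evaluated once per artist entry in both programs)
def pvGuard (u : String) : Bool := PySem.Str.pyGet? u (-1) != some '$'

-- ===== PORT A =====
def how_pop_is_most_pop_artist (user_map : List (String × List String)) : Int :=
  let bestArtist : PySem.Dict String Int :=
    user_map.foldl (fun d p =>
      p.2.foldl (fun d v =>
        if d.contains v && pvGuard p.1 then d.insert v (d.getD v 0 + 1)
        else if !d.contains v && pvGuard p.1 then d.insert v 1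
        else d) d) PySem.Dict.empty
  bestArtist.values.foldl (fun maxScore v => if v > maxScore then v else maxScore) 0

-- ===== PORT B =====
-- one scan step of Source B's run-length loop: state = (best, run, prev)
def pvScanStep (s : Int × Int × Option String) (a : String) : Int × Int × Option String :=
  let run : Int := if s.2.2 == some a then s.2.1 + 1 else 1
  ((if run > s.1 then run else s.1), run, some a)

def how_pop_is_most_pop_artist_alt (user_map : List (String × List String)) : Int :=
  let flat : List String :=
    PySem.List.sorted (user_map.flatMap (fun p => p.2.filter (fun _ => pvGuard p.1))) (fun x => x) false
  (flat.foldl pvScanStep (0, 0, none)).1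

-- ===== PRECONDITION & SPEC =====
-- Pre_ excludes exactly the inputs where Python raises IndexError: an empty username with a
-- non-empty artist list makes username[-1] raise (in A and in B alike).
def Pre_how_pop_is_most_pop_artist (user_map : List (String × List String)) : Prop :=
  ∀ p ∈ user_map, p.2 ≠ [] → p.1 ≠ ""
instance (user_map : List (String × List String)) : Decidable (Pre_how_pop_is_most_pop_artist user_map) := by unfold Pre_how_pop_is_most_pop_artist; infer_instance

def pvWitness_how_pop_is_most_pop_artist : (List (String × List String)) :=
  [("alice", ["x", "x", "y"]), ("bob$", ["x"]), ("carol", ["y"])]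

def Spec_how_pop_is_most_pop_artist (user_map : List (String × List String)) (out : Int) : Prop := out = how_pop_is_most_pop_artist_alt user_map
instance (user_map : List (String × List String)) (out : Int) : Decidable (Spec_how_pop_is_most_pop_artist user_map out) := by unfold Spec_how_pop_is_most_pop_artist; infer_instance

-- ===== CLAIM (what is proved, stated in full; the proofs are below) =====
def Claim_equal_how_pop_is_most_pop_artist : Prop := ∀ (user_map : List (String × List String)), Dom_how_pop_is_most_pop_artist user_map → Pre_how_pop_is_most_pop_artist user_map → Spec_how_pop_is_most_pop_artist user_map (how_pop_is_most_pop_artist user_map)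

-- ===== LEMMAS AND PROOFS =====

-- the filtered flatten list both results are counting over
def pvFlat (user_map : List (String × List String)) : List String :=
  user_map.flatMap (fun p => p.2.filter (fun _ => pvGuard p.1))

-- max multiplicity of any element of l (0 for []), phrased as A computes it
def pvM (l : List String) : Int :=
  ((PySem.Set.ofList l).map (fun v => (l.count v : Int))).foldl max 0

theorem pv_if_gt_eq_max (m v : Int) : (if v > m then v else m) = max m v := by
  by_cases h : v > m
  · simp [h, max_eq_right h.le]
  · simp [h, max_eq_left (not_lt.1 h)]

theorem pv_fold_max_shift (L : List Int) : ∀ (a b : Int), L.foldl max (max a b) = max a (L.foldl max b) := by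
  induction L with
  | nil => intro a b; rfl
  | cons c L ih => intro a b; simpa [List.foldl_cons, max_assoc] using ih a (max b c)

theorem pv_dict_eq_counter (user_map : List (String × List String)) :
    user_map.foldl (fun d p =>
      p.2.foldl (fun d v =>
        if d.contains v && pvGuard p.1 then d.insert v (d.getD v 0 + 1)
        else if !d.contains v && pvGuard p.1 then d.insert v 1
        else d) d) PySem.Dict.empty = PySem.Dict.counter (pvFlat user_map) := by
  rw [← PySem.Dict.foldl_insert_getD_add_one_eq_counter, pvFlat, List.foldl_flatMap]
  apply PySem.List.foldl_congr_mem
  intro d p _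
  by_cases hg : pvGuard p.1 = true
  · rw [hg, List.filter_true]
    apply PySem.List.foldl_congr_mem
    intro d v _
    by_cases hc : d.contains v = true
    · simp [hc]
    · simp [Bool.not_eq_true] at hc
      simp [hc, PySem.Dict.getD_of_not_contains d 0 hc]
  · simp [Bool.not_eq_true] at hg
    simp [hg]

theorem pv_A_eq_pvM (user_map : List (String × List String)) :
    how_pop_is_most_pop_artist user_map = pvM (pvFlat user_map) := by
  show ((fun bestArtist : PySem.Dict String Int =>
      bestArtist.values.foldl (fun maxScore v => if v > maxScore then v else maxScore) 0)
    (List.foldl _ PySem.Dict.empty user_map)) = _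
  rw [pv_dict_eq_counter]
  show (PySem.Dict.counter (pvFlat user_map)).values.foldl
      (fun maxScore v => if v > maxScore then v else maxScore) 0 = pvM (pvFlat user_map)
  have hv : (PySem.Dict.counter (pvFlat user_map)).values
      = (PySem.Set.ofList (pvFlat user_map)).map (fun v => ((pvFlat user_map).count v : Int)) := by
    simp only [PySem.Dict.values, PySem.Dict.items_counter, List.map_map, Function.comp_def]
  rw [hv, pvM]
  apply PySem.List.foldl_congr_mem
  intro m v _
  exact pv_if_gt_eq_max m v

theorem pv_pvM_perm {l₁ l₂ : List String} (h : l₁.Perm l₂) : pvM l₁ = pvM l₂ := by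
  unfold pvM
  have hm : (PySem.Set.ofList l₁).map (fun v => (l₁.count v : Int))
      = (PySem.Set.ofList l₁).map (fun v => (l₂.count v : Int)) := by
    apply List.map_congr_left
    intro v _
    exact congrArg (Nat.cast : Nat → Int) (h.count_eq v)
  rw [hm]
  have hperm : (PySem.Set.ofList l₁).Perm (PySem.Set.ofList l₂) := by
    rw [List.perm_ext_iff_of_nodup (PySem.Set.nodup_ofList l₁) (PySem.Set.nodup_ofList l₂)]
    intro a
    rw [PySem.Set.mem_ofList, PySem.Set.mem_ofList]
    exact h.mem_iff
  exact (hperm.map _).foldl_eq 0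

theorem pv_pvM_nonneg (l : List String) : 0 ≤ pvM l :=
  (PySem.List.le_foldl_max ((PySem.Set.ofList l).map (fun v => (l.count v : Int))) 0).1

-- pvM of a list  x :: c ++ t  with c all-x and t x-free
theorem pv_pvM_chunk (x : String) (c t : List String)
    (hc : ∀ y ∈ c, y = x) (ht : ∀ y ∈ t, y ≠ x) :
    pvM (x :: (c ++ t)) = max (1 + (c.length : Int)) (pvM t) := by
  have hxt : x ∉ t := fun h => ht x h rfl
  have hcx : ∀ v, v ≠ x → v ∉ c := fun v hv h => hv (hc v h)
  have hcount_x : (x :: (c ++ t)).count x = 1 + c.length := by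
    rw [List.count_cons_self, List.count_append,
      List.count_eq_length.2 (fun b hb => (hc b hb).symm),
      List.count_eq_zero.2 hxt]
    omega
  have hcount_t : ∀ v ∈ t, (x :: (c ++ t)).count v = t.count v := by
    intro v hv
    have hvx : v ≠ x := ht v hv
    rw [List.count_cons_of_ne hvx.symm, List.count_append,
      List.count_eq_zero.2 (hcx v hvx)]
    omega
  have hset : (x :: PySem.Set.ofList t).Perm (PySem.Set.ofList (x :: (c ++ t))) := by
    rw [List.perm_ext_iff_of_nodup
      (List.nodup_cons.2 ⟨fun h => hxt ((PySem.Set.mem_ofList t x).1 h), PySem.Set.nodup_ofList t⟩)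
      (PySem.Set.nodup_ofList _)]
    intro a
    rw [PySem.Set.mem_ofList]
    simp only [List.mem_cons, PySem.Set.mem_ofList, List.mem_append]
    constructor
    · rintro (rfl | h)
      · exact Or.inl rfl
      · exact Or.inr (Or.inr h)
    · rintro (rfl | h | h)
      · exact Or.inl rfl
      · exact Or.inl (hc a h)
      · exact Or.inr h
  unfold pvM
  rw [← (hset.map (fun v => (((x :: (c ++ t)).count v : Nat) : Int))).foldl_eq 0]
  rw [List.map_cons, List.foldl_cons, hcount_x]
  rw [List.map_congr_left (fun v hv =>
    congrArg (Nat.cast : Nat → Int) (hcount_t v ((PySem.Set.mem_ofList t v).1 hv)))]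
  rw [max_comm 0 _, pv_fold_max_shift]
  push_cast
  ring_nf

theorem pv_chunk_scan (c : List String) (x : String) :
    ∀ (b r : Int), r ≤ b → (∀ y ∈ c, y = x) →
      c.foldl pvScanStep (b, r, some x) = (max b (r + c.length), r + c.length, some x) := by
  induction c with
  | nil => intro b r hrb _; simp [max_eq_left hrb]
  | cons y c ih =>
      intro b r hrb hall
      have hy : y = x := hall y (by simp)
      have hstep : pvScanStep (b, r, some x) y = (max b (r + 1), r + 1, some x) := by
        simp [pvScanStep, hy]
        split <;> omega
      rw [List.foldl_cons, hstep,
        ih (max b (r + 1)) (r + 1) (le_max_right b (r + 1)) (fun z hz => hall z (by simp [hz]))]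
      rw [max_assoc, max_eq_right (by omega : (r + 1 : Int) ≤ r + 1 + (c.length : Int))]
      have h1 : r + 1 + (c.length : Int) = r + ((y :: c).length : Int) := by
        simp [List.length_cons]
        ring
      rw [h1]

theorem pv_drop_gt (x : String) : ∀ (xs : List String),
    xs.Pairwise (· ≤ ·) → (∀ y ∈ xs, x ≤ y) →
    ∀ y ∈ xs.dropWhile (fun y => y == x), y ≠ x := by
  intro xs
  induction xs with
  | nil => intro _ _ y hy; simp [List.dropWhile] at hy
  | cons z zs ih =>
      intro hp hlb y hy
      rw [List.dropWhile_cons] at hy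
      by_cases hz : (z == x) = true
      · rw [if_pos hz] at hy
        exact ih hp.of_cons (fun w hw => hlb w (by simp [hw])) y hy
      · rw [if_neg hz] at hy
        have hzx : z ≠ x := by simpa using hz
        have hxz : x < z := lt_of_le_of_ne (hlb z (by simp)) (Ne.symm hzx)
        rcases List.mem_cons.1 hy with rfl | hy'
        · exact hzx
        · have : z ≤ y := (List.pairwise_cons.1 hp).1 y hy'
          exact fun h => absurd (h ▸ this) (not_le.2 hxz)

theorem pv_scan_main : ∀ (n : Nat) (l : List String), l.length = n →
    l.Pairwise (· ≤ ·) →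
    ∀ (b r : Int) (prev : Option String), 0 ≤ b → (∀ x ∈ l, prev ≠ some x) →
      (l.foldl pvScanStep (b, r, prev)).1 = max b (pvM l) := by
  intro n
  induction n using Nat.strong_induction_on with
  | _ n ih =>
    intro l hlen hpair b r prev hb hprev
    match l, hlen with
    | [], _ =>
        have h0 : pvM [] = 0 := rfl
        simp [h0, max_eq_left hb]
    | x :: xs, hlen =>
        have hpx : prev ≠ some x := hprev x (by simp)
        have hstep : pvScanStep (b, r, prev) x = (max b 1, 1, some x) := by
          have hne : (prev == some x) = false := by simpa using hpx
          simp [pvScanStep, hne]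
          split <;> omega
        have hxs : xs.takeWhile (fun y => y == x) ++ xs.dropWhile (fun y => y == x) = xs :=
          List.takeWhile_append_dropWhile
        have hcall : ∀ y ∈ xs.takeWhile (fun y => y == x), y = x := by
          intro y hy
          simpa using List.mem_takeWhile_imp hy
        have hxle : ∀ y ∈ xs, x ≤ y := (List.pairwise_cons.1 hpair).1
        have hpxs : xs.Pairwise (· ≤ ·) := (List.pairwise_cons.1 hpair).2
        have htne : ∀ y ∈ xs.dropWhile (fun y => y == x), y ≠ x := pv_drop_gt x xs hpxs hxle
        have htpair : (xs.dropWhile (fun y => y == x)).Pairwise (· ≤ ·) :=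
          hpxs.sublist (List.dropWhile_suffix _).sublist
        have hlt : (xs.dropWhile (fun y => y == x)).length < n := by
          have hle := (List.dropWhile_suffix (l := xs) (fun y => y == x)).length_le
          simp only [List.length_cons] at hlen
          omega
        have hrec := ih _ hlt (xs.dropWhile (fun y => y == x)) rfl htpair
          (max b (1 + ((xs.takeWhile (fun y => y == x)).length : Int)))
          (1 + ((xs.takeWhile (fun y => y == x)).length : Int)) (some x)
          (le_trans hb (le_max_left _ _))
          (fun y hy h => htne y hy (Option.some.inj h).symm)
        rw [List.foldl_cons, hstep, ← hxs, List.foldl_append,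
          pv_chunk_scan _ x (max b 1) 1 (le_max_right b 1) hcall,
          max_assoc, max_eq_right (by omega :
            (1 : Int) ≤ 1 + ((xs.takeWhile (fun y => y == x)).length : Int)),
          hrec, pv_pvM_chunk x _ _ hcall htne, max_assoc]

theorem pv_B_eq_pvM (user_map : List (String × List String)) :
    how_pop_is_most_pop_artist_alt user_map = pvM (pvFlat user_map) := by
  unfold how_pop_is_most_pop_artist_alt
  have hs := pv_scan_main (PySem.List.sorted (pvFlat user_map) (fun x => x) false).length
    (PySem.List.sorted (pvFlat user_map) (fun x => x) false) rfl
    (PySem.List.sorted_pairwise (pvFlat user_map) (fun x => x))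
    0 0 none le_rfl (by intro x _ h; cases h)
  rw [pvFlat] at hs ⊢
  rw [hs, max_eq_right (pv_pvM_nonneg _)]
  exact pv_pvM_perm (PySem.List.sorted_perm _ _ _)

-- ===== VERDICT (by name: the statement is the Claim_ definition above) =====
theorem how_pop_is_most_pop_artist_spec : Claim_equal_how_pop_is_most_pop_artist := by
  intro user_map _ _
  unfold Spec_how_pop_is_most_pop_artist
  rw [pv_A_eq_pvM, pv_B_eq_pvM]
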